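-- pv_equiv track=rewrite | github.com/aniruddha1321/CodeRenew | backend/security_check.py | extract_line_number
-- ===== SOURCE A (Python) =====
-- def extract_line_number(code: str, flagged_code: str) -> int:
--     """Extract the line number where the flagged code appears."""
--     if not flagged_code or not flagged_code.strip():
--         return 1
--
--     lines = code.split('\n')
--     flagged_lines = flagged_code.strip().split('\n')
--
--     # If it's a single line, try to find exact match first, then partial
--     if len(flagged_lines) == 1:
--         flagged_line = flagged_lines[0].strip()
--
--         # Try exact match first
--         for i, line in enumerate(lines, 1):
--             if line.strip() == flagged_line:
--                 return i
--
--         # Try partial match if no exact match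
--         for i, line in enumerate(lines, 1):
--             if flagged_line in line.strip():
--                 return i
--     else:
--         # For multiline flagged code, look for the first line
--         first_flagged_line = flagged_lines[0].strip()
--         if first_flagged_line:
--             for i, line in enumerate(lines, 1):
--                 if first_flagged_line in line.strip():
--                     return i
--
--     return 1  # Default to line 1 if not found
-- ===== SOURCE B (Python) =====
-- def extract_line_number(code: str, flagged_code: str) -> int:
--     """Extract the line number where the flagged code appears.
--
--     Single pass: one loop over the lines keeps the first exact-match index
--     (single-line mode only) and the first partial-match index; priority is
--     resolved after the loop (exact wins, then partial, then 1).
--     """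
--     stripped = flagged_code.strip()
--     if not stripped:
--         return 1
--     flines = stripped.split('\n')
--     single = len(flines) == 1
--     target = flines[0].strip()
--     first_exact = 0
--     first_partial = 0
--     for i, line in enumerate(code.split('\n'), 1):
--         s = line.strip()
--         if single and first_exact == 0 and s == target:
--             first_exact = i
--         if first_partial == 0 and target in s:
--             first_partial = i
--     return (first_exact if single else 0) or first_partial or 1
-- ===== Notes on version B (the rewrite author's own statement) =====
-- stated objective: alternative
-- what changed: A scans the line list up to three times (an exact-match pass, then a partial-match pass, plus a separate multiline branch); B makes a single pass keeping two candidate indices (first exact, first partial) and resolves the exact-over-partial priority after the loop.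
import Mathlib
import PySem

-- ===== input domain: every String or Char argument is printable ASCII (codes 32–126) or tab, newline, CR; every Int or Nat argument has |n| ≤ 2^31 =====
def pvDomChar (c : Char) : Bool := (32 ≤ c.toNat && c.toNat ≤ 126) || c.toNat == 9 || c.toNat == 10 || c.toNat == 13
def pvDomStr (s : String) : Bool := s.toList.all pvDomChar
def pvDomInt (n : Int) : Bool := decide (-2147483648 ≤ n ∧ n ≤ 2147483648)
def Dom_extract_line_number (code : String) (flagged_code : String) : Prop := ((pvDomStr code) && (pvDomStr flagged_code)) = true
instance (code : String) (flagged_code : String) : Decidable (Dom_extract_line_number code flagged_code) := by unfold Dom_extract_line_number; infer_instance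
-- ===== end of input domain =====

-- B replaces A's up-to-three scans of the line list (exact pass, partial pass, multiline branch)
-- by ONE pass keeping two candidate indices, priority resolved after the loop (alternative, same cost).

-- ===== PORT A =====
-- 'for i, line in enumerate(lines, 1): if line.strip() == flagged_line: return i'
def pvFindExact (t : List Char) : List (List Char) → Int → Option Int
  | [], _ => none
  | l :: rest, i => if PySem.Chars.strip l == t then some i else pvFindExact t rest (i + 1)

-- 'for i, line in enumerate(lines, 1): if flagged_line in line.strip(): return i'
def pvFindPartial (t : List Char) : List (List Char) → Int → Option Int
  | [], _ => none
  | l :: rest, i => if PySem.Chars.isIn t (PySem.Chars.strip l) then some i else pvFindPartial t rest (i + 1)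

def extract_line_number (code : String) (flagged_code : String) : Int :=
  if flagged_code.toList == [] || PySem.Chars.strip flagged_code.toList == [] then 1
  else
    let lines := PySem.Chars.splitOn code.toList ['\n']
    let flagged_lines := PySem.Chars.splitOn (PySem.Chars.strip flagged_code.toList) ['\n']
    if flagged_lines.length == 1 then
      -- split always returns a nonempty list, so Python's flagged_lines[0] never raises ('.getD []' unreachable)
      let flagged_line := PySem.Chars.strip ((PySem.List.pyGet? flagged_lines 0).getD [])
      match pvFindExact flagged_line lines 1 with
      | some i => i
      | none =>
        match pvFindPartial flagged_line lines 1 with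
        | some i => i
        | none => 1
    else
      let first_flagged_line := PySem.Chars.strip ((PySem.List.pyGet? flagged_lines 0).getD [])
      if first_flagged_line ≠ [] then
        match pvFindPartial first_flagged_line lines 1 with
        | some i => i
        | none => 1
      else 1

-- ===== PORT B =====
-- the single 'for i, line in enumerate(code.split('\n'), 1)' loop of Source B, state = (first_exact, first_partial)
def pvAltLoop (single : Bool) (target : List Char) : List (List Char) → Int → Int × Int → Int × Int
  | [], _, st => st
  | line :: rest, i, (e, p) =>
    let s := PySem.Chars.strip line
    pvAltLoop single target rest (i + 1)
      ((if single && (e == 0) && (s == target) then i else e),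
       (if (p == 0) && PySem.Chars.isIn target s then i else p))

def extract_line_number_alt (code : String) (flagged_code : String) : Int :=
  let stripped := PySem.Chars.strip flagged_code.toList
  if stripped == [] then 1
  else
    let flines := PySem.Chars.splitOn stripped ['\n']
    let single := flines.length == 1
    let target := PySem.Chars.strip (flines.headD [])
    let ep := pvAltLoop single target (PySem.Chars.splitOn code.toList ['\n']) 1 (0, 0)
    let e := if single then ep.1 else 0
    if e ≠ 0 then e else if ep.2 ≠ 0 then ep.2 else 1

-- ===== PRECONDITION & SPEC =====
def Spec_extract_line_number (code : String) (flagged_code : String) (out : Int) : Prop := out = extract_line_number_alt code flagged_code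
instance (code : String) (flagged_code : String) (out : Int) : Decidable (Spec_extract_line_number code flagged_code out) := by unfold Spec_extract_line_number; infer_instance

-- ===== CLAIM (what is proved, stated in full; the proofs are below) =====
def Claim_equal_extract_line_number : Prop := ∀ (code : String) (flagged_code : String), Dom_extract_line_number code flagged_code → Spec_extract_line_number code flagged_code (extract_line_number code flagged_code)

-- ===== LEMMAS AND PROOFS =====

lemma pvSplitOn_go_ne_nil (sep : List Char) :
    ∀ (fuel : Nat) (l cur : List Char) (acc : List (List Char)),
      PySem.Chars.splitOn.go sep fuel l cur acc ≠ [] := by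
  intro fuel
  induction fuel with
  | zero => intro l cur acc; simp [PySem.Chars.splitOn.go]
  | succ n ih =>
    intro l cur acc
    cases l with
    | nil => simp [PySem.Chars.splitOn.go]
    | cons c rest =>
      rw [PySem.Chars.splitOn.go]
      split
      · exact ih _ _ _
      · exact ih _ _ _

lemma pvSplitOn_ne_nil (s sep : List Char) : PySem.Chars.splitOn s sep ≠ [] :=
  pvSplitOn_go_ne_nil sep _ s [] []

lemma pvFindExact_pos (t : List Char) :
    ∀ (L : List (List Char)) (i j : Int), 1 ≤ i → pvFindExact t L i = some j → 1 ≤ j := by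
  intro L
  induction L with
  | nil => intro i j _ h; simp [pvFindExact] at h
  | cons l rest ih =>
    intro i j hi h
    rw [pvFindExact] at h
    split at h
    · cases h; omega
    · exact ih (i + 1) j (by omega) h

lemma pvFindPartial_pos (t : List Char) :
    ∀ (L : List (List Char)) (i j : Int), 1 ≤ i → pvFindPartial t L i = some j → 1 ≤ j := by
  intro L
  induction L with
  | nil => intro i j _ h; simp [pvFindPartial] at h
  | cons l rest ih =>
    intro i j hi h
    rw [pvFindPartial] at h
    split at h
    · cases h; omega
    · exact ih (i + 1) j (by omega) h

lemma pvAltLoop_eq (single : Bool) (t : List Char) :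
    ∀ (L : List (List Char)) (i e p : Int), 1 ≤ i →
      pvAltLoop single t L i (e, p) =
        ((if single = true ∧ e = 0 then (pvFindExact t L i).getD 0 else e),
         (if p = 0 then (pvFindPartial t L i).getD 0 else p)) := by
  intro L
  induction L with
  | nil => intro i e p hi; simp [pvAltLoop, pvFindExact, pvFindPartial]
  | cons l rest ih =>
    intro i e p hi
    have hi0 : ¬ i = 0 := by omega
    rw [pvAltLoop]
    rw [ih _ _ _ (by omega), pvFindExact, pvFindPartial]
    by_cases hs1 : single = true <;> by_cases he : e = 0 <;>
      by_cases hst : (PySem.Chars.strip l == t) = true <;>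
      by_cases hp : p = 0 <;>
      by_cases hin : PySem.Chars.isIn t (PySem.Chars.strip l) = true <;>
      simp [hs1, he, hst, hp, hin, hi0]

theorem extract_line_number_spec : Claim_equal_extract_line_number := by
  unfold Claim_equal_extract_line_number Spec_extract_line_number
  intro code flagged_code _hdom
  by_cases hst : PySem.Chars.strip flagged_code.toList = []
  · simp [extract_line_number, extract_line_number_alt, hst]
  · have hne : flagged_code.toList ≠ [] := by intro h; exact hst (by rw [h]; rfl)
    simp only [extract_line_number, extract_line_number_alt, hne, hst, beq_iff_eq, if_false,
      Bool.or_eq_true, or_self]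
    obtain ⟨f0, ftl, hfl⟩ :=
      List.exists_cons_of_ne_nil (pvSplitOn_ne_nil (PySem.Chars.strip flagged_code.toList) ['\n'])
    obtain ⟨l0, ltl, hls⟩ := List.exists_cons_of_ne_nil (pvSplitOn_ne_nil code.toList ['\n'])
    rw [hfl, hls]
    have hget : (PySem.List.pyGet? (f0 :: ftl) (0 : Int)).getD [] = f0 := by
      simp [PySem.List.pyGet?, PySem.List.pyIdx?]
    rw [hget]
    simp only [List.headD_cons]
    by_cases hL : (f0 :: ftl).length = 1
    · -- single-line flagged code
      rw [show ((f0 :: ftl).length == 1) = true from beq_iff_eq.mpr hL,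
        pvAltLoop_eq true (PySem.Chars.strip f0) (l0 :: ltl) 1 0 0 (by omega), if_pos hL]
      cases hFE : pvFindExact (PySem.Chars.strip f0) (l0 :: ltl) 1 with
      | some j =>
        have hj : 1 ≤ j := pvFindExact_pos _ _ _ _ (by omega) hFE
        simp [hL, show j ≠ 0 by omega]
      | none =>
        cases hFP : pvFindPartial (PySem.Chars.strip f0) (l0 :: ltl) 1 with
        | some j =>
          have hj : 1 ≤ j := pvFindPartial_pos _ _ _ _ (by omega) hFP
          simp [show j ≠ 0 by omega]
        | none => simp
    · -- multiline flagged code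
      rw [show ((f0 :: ftl).length == 1) = false from beq_eq_false_iff_ne.mpr hL,
        pvAltLoop_eq false (PySem.Chars.strip f0) (l0 :: ltl) 1 0 0 (by omega), if_neg hL]
      by_cases hf0 : PySem.Chars.strip f0 = []
      · -- empty stripped first flagged line: A returns 1; B's partial scan hits line 1 ('' is a substring of every line)
        rw [if_neg (by simp [hf0])]
        have hp1 : pvFindPartial (PySem.Chars.strip f0) (l0 :: ltl) 1 = some 1 := by
          rw [pvFindPartial, if_pos (by rw [hf0]; exact PySem.Chars.isIn_nil _)]
        simp [hp1]
      · rw [if_pos (by simp [hf0])]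
        cases hFP : pvFindPartial (PySem.Chars.strip f0) (l0 :: ltl) 1 with
        | some j =>
          have hj : 1 ≤ j := pvFindPartial_pos _ _ _ _ (by omega) hFP
          simp [show j ≠ 0 by omega]
        | none => simp
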